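-- pv_equiv track=rewrite | github.com/Arnavd83/avocado | scripts/run_seed_dataset.py | _model_slug
-- ===== SOURCE A (Python) =====
-- def _slugify(value: str) -> str:
--     value = value.lower()
--     cleaned = []
--     for char in value:
--         if char.isalnum():
--             cleaned.append(char)
--         else:
--             cleaned.append("_")
--     slug = "".join(cleaned).strip("_")
--     while "__" in slug:
--         slug = slug.replace("__", "_")
--     return slug or "seed"
--
-- def _model_slug(model_id: str) -> str:
--     base = model_id.split("/")[-1]
--     for suffix in ("-chat", "-instruct", "-preview"):
--         if base.endswith(suffix):
--             base = base[: -len(suffix)]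
--             break
--     base = base.replace(".", "_")
--     slug = _slugify(base)
--     return slug or "model"
-- ===== SOURCE B (Python) =====
-- def _model_slug(model_id: str) -> str:
--     base = model_id.split("/")[-1]
--     for suffix in ("-chat", "-instruct", "-preview"):
--         if base.endswith(suffix):
--             base = base[: -len(suffix)]
--             break
--     base = base.replace(".", "_")
--     out = []
--     last_us = False
--     for ch in base.lower():
--         if ch.isalnum():
--             out.append(ch)
--             last_us = False
--         else:
--             if not last_us:
--                 out.append("_")
--             last_us = True
--     slug = "".join(out).strip("_")
--     return slug or "seed"
-- ===== Notes on version B (the rewrite author's own statement) =====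
-- stated objective: simpler
-- what changed: B fuses A's three slugify phases (per-character classification loop, strip, and the while-loop that repeatedly collapses doubled underscores via replace) into one stateful pass over the lowered string that tracks whether the last emitted character was an underscore, so each run of non-alphanumeric characters yields at most one underscore.
import Mathlib
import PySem

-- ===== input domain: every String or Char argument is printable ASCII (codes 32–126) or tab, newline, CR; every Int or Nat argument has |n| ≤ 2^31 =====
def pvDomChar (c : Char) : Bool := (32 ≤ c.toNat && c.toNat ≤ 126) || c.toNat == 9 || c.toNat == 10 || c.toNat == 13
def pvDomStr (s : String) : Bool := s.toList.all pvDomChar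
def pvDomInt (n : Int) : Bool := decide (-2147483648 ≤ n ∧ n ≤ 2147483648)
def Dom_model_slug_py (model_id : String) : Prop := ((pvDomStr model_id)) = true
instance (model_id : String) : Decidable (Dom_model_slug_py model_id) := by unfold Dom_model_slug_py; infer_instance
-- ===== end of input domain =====

-- B rewrites _slugify as one fused pass with a 'last was underscore' flag, replacing
-- A's classification loop + strip + repeated replace("__","_") loop (objective: simpler).

-- ===== PORT A =====
-- pvRep models ONE pass of slug.replace("__","_"); it is needed only to justify
-- termination of the port's while-loop (the loop strictly shrinks the string).
def pvRep : List Char → List Char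
  | [] => []
  | [c] => [c]
  | a :: b :: t => if a = '_' ∧ b = '_' then '_' :: pvRep t else a :: pvRep (b :: t)

theorem pvRep_go_eq (fuel : Nat) (l acc : List Char) (h : l.length ≤ fuel) :
    PySem.Chars.replace.go ['_', '_'] ['_'] fuel l acc = acc.reverse ++ pvRep l := by
  induction fuel generalizing l acc with
  | zero =>
      cases l with
      | nil => simp [PySem.Chars.replace.go, pvRep]
      | cons c t => simp at h
  | succ n ih =>
      cases l with
      | nil => simp [PySem.Chars.replace.go, pvRep]
      | cons c t =>
        cases t with
        | nil =>
            have hpre : List.isPrefixOf ['_', '_'] [c] = false := by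
              simp [List.isPrefixOf]
            simp [PySem.Chars.replace.go, hpre, pvRep, ih [] (c :: acc) (by simp)]
        | cons b t' =>
            by_cases hc : c = '_' ∧ b = '_'
            · have hpre : List.isPrefixOf ['_', '_'] (c :: b :: t') = true := by
                simp [List.isPrefixOf, hc.1, hc.2]
              have := ih t' ('_' :: acc) (by simp at h ⊢; omega)
              simp [PySem.Chars.replace.go, pvRep, hc, this]
            · have hpre : List.isPrefixOf ['_', '_'] (c :: b :: t') = false := by
                by_contra hfalse
                simp [List.isPrefixOf] at hfalse
                exact hc ⟨hfalse.1.symm, hfalse.2.symm⟩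
              have := ih (b :: t') (c :: acc) (by simp at h ⊢; omega)
              simp [PySem.Chars.replace.go, hpre, pvRep, hc, this]

theorem pvReplace_eq (l : List Char) :
    PySem.Chars.replace l ['_', '_'] ['_'] = pvRep l := by
  simp [PySem.Chars.replace, pvRep_go_eq l.length l [] (le_refl _)]

theorem pvRep_length_le (m : List Char) : (pvRep m).length ≤ m.length := by
  induction m using pvRep.induct with
  | case1 => simp [pvRep]
  | case2 => simp [pvRep]
  | case3 a' b' t' h' ih' => simp [pvRep, h'] at ih' ⊢; omega
  | case4 a' b' t' h' ih' => simp [pvRep, h'] at ih' ⊢; omega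

theorem pvRep_length_lt (l : List Char) (h : ['_', '_'] <:+: l) :
    (pvRep l).length < l.length := by
  induction l using pvRep.induct with
  | case1 => simp at h
  | case2 c =>
      exfalso
      have := h.length_le
      simp at this
  | case3 a b t hab ih =>
      simp [pvRep, hab]
      have := pvRep_length_le t
      omega
  | case4 a b t hab ih =>
      have htail : ['_', '_'] <:+: b :: t := by
        rcases List.infix_cons_iff.mp h with hp | hi
        · exfalso
          rcases hp with ⟨u, hu⟩
          simp at hu
          exact hab ⟨hu.1.symm, hu.2.1.symm⟩
        · exact hi
      have := ih htail
      rw [show pvRep (a :: b :: t) = a :: pvRep (b :: t) by simp [pvRep, hab]]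
      simp at this ⊢
      omega

-- while "__" in slug: slug = slug.replace("__", "_")
def pvSlugLoop (slug : List Char) : List Char :=
  if PySem.Chars.isIn ['_', '_'] slug then
    pvSlugLoop (PySem.Chars.replace slug ['_', '_'] ['_'])
  else slug
termination_by slug.length
decreasing_by
  rw [pvReplace_eq]
  exact pvRep_length_lt _ ((PySem.Chars.isIn_iff_infix _ _).mp (by assumption))

-- _slugify, on code points
def pvSlugifyA (value : List Char) : List Char :=
  let v := PySem.Chars.lower value
  let cleaned := v.foldl (fun acc c => acc ++ [if PySem.Chars.isalnum c then c else '_']) []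
  let slug := PySem.Chars.stripChars (PySem.Chars.join [] (cleaned.map (fun c => [c]))) ['_']
  let slug := pvSlugLoop slug
  if slug = [] then ['s', 'e', 'e', 'd'] else slug

-- the for-suffix loop with break
def pvSuffixA (base : List Char) : List (List Char) → List Char
  | [] => base
  | suf :: rest =>
      if PySem.Chars.endswith base suf then
        PySem.Chars.slice base none (some (-(suf.length : Int)))
      else pvSuffixA base rest

def model_slug_py (model_id : String) : String :=
  let parts := (PySem.Chars.split? model_id.toList ['/']).getD []  -- sep ≠ "", always some
  let base := (PySem.List.pyGet? parts (-1)).getD []               -- split is never empty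
  let base := pvSuffixA base
      [['-', 'c', 'h', 'a', 't'],
       ['-', 'i', 'n', 's', 't', 'r', 'u', 'c', 't'],
       ['-', 'p', 'r', 'e', 'v', 'i', 'e', 'w']]
  let base := PySem.Chars.replace base ['.'] ['_']
  let slug := pvSlugifyA base
  String.ofList (if slug = [] then ['m', 'o', 'd', 'e', 'l'] else slug)

-- ===== PORT B =====
-- single fused pass: append alnum chars; emit '_' only at the start of a non-alnum run
def pvSlugifyB (value : List Char) : List Char :=
  let st := (PySem.Chars.lower value).foldl
      (fun (p : List Char × Bool) c =>
        if PySem.Chars.isalnum c then (p.1 ++ [c], false)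
        else if p.2 = false then (p.1 ++ ['_'], true) else (p.1, true))
      ([], false)
  let slug := PySem.Chars.stripChars st.1 ['_']
  if slug = [] then ['s', 'e', 'e', 'd'] else slug

def pvSuffixB (base : List Char) : List (List Char) → List Char
  | [] => base
  | suf :: rest =>
      if PySem.Chars.endswith base suf then
        PySem.Chars.slice base none (some (-(suf.length : Int)))
      else pvSuffixB base rest

def model_slug_py_alt (model_id : String) : String :=
  let parts := (PySem.Chars.split? model_id.toList ['/']).getD []
  let base := (PySem.List.pyGet? parts (-1)).getD []
  let base := pvSuffixB base
      [['-', 'c', 'h', 'a', 't'],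
       ['-', 'i', 'n', 's', 't', 'r', 'u', 'c', 't'],
       ['-', 'p', 'r', 'e', 'v', 'i', 'e', 'w']]
  let base := PySem.Chars.replace base ['.'] ['_']
  String.ofList (pvSlugifyB base)

-- ===== PRECONDITION & SPEC =====
def Spec_model_slug_py (model_id : String) (out : String) : Prop := out = model_slug_py_alt model_id
instance (model_id : String) (out : String) : Decidable (Spec_model_slug_py model_id out) := by unfold Spec_model_slug_py; infer_instance

-- ===== CLAIM (what is proved, stated in full; the proofs are below) =====
def Claim_equal_model_slug_py : Prop := ∀ (model_id : String), Dom_model_slug_py model_id → Spec_model_slug_py model_id (model_slug_py model_id)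

-- ===== LEMMAS AND PROOFS =====

-- canonical collapse of '_'-runs to a single '_'
def pvSquash : List Char → List Char
  | [] => []
  | [c] => [c]
  | a :: b :: t => if a = '_' ∧ b = '_' then pvSquash (b :: t) else a :: pvSquash (b :: t)

theorem pvSquash_of_no_double (l : List Char) (h : ¬ ['_', '_'] <:+: l) :
    pvSquash l = l := by
  induction l using pvSquash.induct with
  | case1 => rfl
  | case2 c => rfl
  | case3 a b t hab ih =>
      exact absurd (List.IsPrefix.isInfix ⟨t, by simp [hab.1, hab.2]⟩) h
  | case4 a b t hab ih =>
      simp [pvSquash, hab]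
      exact ih (fun hi => h (List.infix_cons hi))

theorem pvRep_cons (b : Char) (t : List Char) : ∃ r, pvRep (b :: t) = b :: r := by
  cases t with
  | nil => exact ⟨[], rfl⟩
  | cons c t' =>
      by_cases h : b = '_' ∧ c = '_'
      · exact ⟨pvRep t', by simp [pvRep, h]⟩
      · exact ⟨pvRep (c :: t'), by simp [pvRep, h]⟩

theorem pvSquash_rep (l : List Char) : pvSquash (pvRep l) = pvSquash l := by
  generalize hn : l.length = n
  induction n using Nat.strong_induction_on generalizing l with
  | _ n ih =>
  cases l with
  | nil => rfl
  | cons a t =>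
    cases t with
    | nil => rfl
    | cons b t' =>
      by_cases hab : a = '_' ∧ b = '_'
      · -- collapse step of pvRep
        obtain ⟨ha, hb⟩ := hab
        subst ha hb
        rw [show pvRep ('_' :: '_' :: t') = '_' :: pvRep t' by simp [pvRep]]
        rw [show pvSquash ('_' :: '_' :: t') = pvSquash ('_' :: t') by simp [pvSquash]]
        cases t' with
        | nil => rfl
        | cons c t'' =>
          obtain ⟨r, hr⟩ := pvRep_cons c t''
          by_cases hc : c = '_'
          · subst hc
            rw [hr]
            rw [show pvSquash ('_' :: '_' :: r) = pvSquash ('_' :: r) by simp [pvSquash]]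
            rw [← hr]
            have h1 : pvSquash (pvRep ('_' :: t'')) = pvSquash ('_' :: t'') := by
              apply ih (t''.length + 1) (by simp at hn; omega) _ rfl
            rw [h1]
            rw [show pvSquash ('_' :: '_' :: t'') = pvSquash ('_' :: t'') by simp [pvSquash]]
          · rw [hr]
            rw [show pvSquash ('_' :: c :: r) = '_' :: pvSquash (c :: r) by
              simp [pvSquash, hc]]
            rw [← hr]
            have h1 : pvSquash (pvRep (c :: t'')) = pvSquash (c :: t'') := by
              apply ih (t''.length + 1) (by simp at hn; omega) _ rfl
            rw [h1]
            rw [show pvSquash ('_' :: c :: t'') = '_' :: pvSquash (c :: t'') by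
              simp [pvSquash, hc]]
      · rw [show pvRep (a :: b :: t') = a :: pvRep (b :: t') by simp [pvRep, hab]]
        obtain ⟨r, hr⟩ := pvRep_cons b t'
        rw [hr]
        rw [show pvSquash (a :: b :: r) = a :: pvSquash (b :: r) by simp [pvSquash, hab]]
        rw [← hr]
        have h1 : pvSquash (pvRep (b :: t')) = pvSquash (b :: t') := by
          apply ih (t'.length + 1) (by simp at hn; omega) _ rfl
        rw [h1]
        rw [show pvSquash (a :: b :: t') = a :: pvSquash (b :: t') by simp [pvSquash, hab]]

theorem pvSlugLoop_eq_squash (l : List Char) : pvSlugLoop l = pvSquash l := by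
  generalize hn : l.length = n
  induction n using Nat.strong_induction_on generalizing l with
  | _ n ih =>
  rw [pvSlugLoop]
  by_cases h : PySem.Chars.isIn ['_', '_'] l = true
  · rw [if_pos h, pvReplace_eq]
    have hinf := (PySem.Chars.isIn_iff_infix _ _).mp h
    have hlt := pvRep_length_lt l hinf
    rw [ih (pvRep l).length (by omega) _ rfl]
    exact pvSquash_rep l
  · rw [if_neg h]
    exact (pvSquash_of_no_double l
      ((PySem.Chars.isIn_eq_false_iff _ _).mp (by simpa using h))).symm

-- B's fused pass, characterised
def pvDedup : Bool → List Char → List Char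
  | _, [] => []
  | flag, c :: t =>
      if c = '_' then (if flag then pvDedup true t else '_' :: pvDedup true t)
      else c :: pvDedup false t

theorem pvDedup_eq_squash (t : List Char) :
    pvDedup false t = pvSquash t ∧ '_' :: pvDedup true t = pvSquash ('_' :: t) := by
  generalize hn : t.length = n
  induction n using Nat.strong_induction_on generalizing t with
  | _ n ih =>
  cases t with
  | nil => simp [pvDedup, pvSquash]
  | cons c t' =>
    have iht' := ih t'.length (by simp at hn; omega) t' rfl
    constructor
    · by_cases hc : c = '_'
      · subst hc
        simpa [pvDedup] using iht'.2
      · rw [show pvDedup false (c :: t') = c :: pvDedup false t' by simp [pvDedup, hc]]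
        rw [iht'.1]
        cases t' with
        | nil => rfl
        | cons d t'' => simp [pvSquash, hc]
    · by_cases hc : c = '_'
      · subst hc
        rw [show pvDedup true ('_' :: t') = pvDedup true t' by simp [pvDedup]]
        rw [show pvSquash ('_' :: '_' :: t') = pvSquash ('_' :: t') by simp [pvSquash]]
        exact iht'.2
      · rw [show pvDedup true (c :: t') = c :: pvDedup false t' by simp [pvDedup, hc]]
        rw [show pvSquash ('_' :: c :: t') = '_' :: pvSquash (c :: t') by simp [pvSquash, hc]]
        rw [iht'.1]
        cases t' with
        | nil => rfl
        | cons d t'' => simp [pvSquash, hc]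

theorem pvIsalnum_underscore : PySem.Chars.isalnum '_' = false := by decide

-- the fold in pvSlugifyB computes pvDedup over the classified characters
theorem pvFused_eq (m : List Char) (acc : List Char) (flag : Bool) :
    (m.foldl
      (fun (p : List Char × Bool) c =>
        if PySem.Chars.isalnum c then (p.1 ++ [c], false)
        else if p.2 = false then (p.1 ++ ['_'], true) else (p.1, true))
      (acc, flag)).1
      = acc ++ pvDedup flag (m.map (fun c => if PySem.Chars.isalnum c then c else '_')) := by
  induction m generalizing acc flag with
  | nil => simp [pvDedup]
  | cons c m' ih =>
    by_cases hc : PySem.Chars.isalnum c = true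
    · have hcu : c ≠ '_' := by
        intro h; rw [h, pvIsalnum_underscore] at hc; exact absurd hc (by simp)
      simp only [List.foldl_cons, List.map_cons, hc, if_pos]
      rw [ih]
      simp [pvDedup, hcu]
    · simp only [List.foldl_cons, List.map_cons]
      rw [if_neg hc]
      cases flag with
      | false => rw [ih]; simp [pvDedup, hc]
      | true => rw [ih]; simp [pvDedup, hc]

-- squash commutes with dropWhile (== '_'), with reverse, hence with strip('_')
theorem pvSquash_dropWhile (w : List Char) :
    List.dropWhile (fun c => c == '_') (pvSquash w)
      = pvSquash (List.dropWhile (fun c => c == '_') w) := by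
  generalize hn : w.length = n
  induction n using Nat.strong_induction_on generalizing w with
  | _ n ih =>
  cases w with
  | nil => rfl
  | cons a t =>
    cases t with
    | nil =>
      by_cases ha : a = '_' <;> simp [pvSquash, beq_iff_eq, ha]
    | cons b t' =>
      by_cases hab : a = '_' ∧ b = '_'
      · obtain ⟨ha, hb⟩ := hab
        subst ha hb
        rw [show pvSquash ('_' :: '_' :: t') = pvSquash ('_' :: t') by simp [pvSquash]]
        rw [show List.dropWhile (fun c => c == '_') ('_' :: '_' :: t')
              = List.dropWhile (fun c => c == '_') ('_' :: t') by simp]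
        exact ih (t'.length + 1) (by simp at hn; omega) _ rfl
      · rw [show pvSquash (a :: b :: t') = a :: pvSquash (b :: t') by simp [pvSquash, hab]]
        by_cases ha : a = '_'
        · have hb : b ≠ '_' := fun hb => hab ⟨ha, hb⟩
          subst ha
          rw [show List.dropWhile (fun c => c == '_') ('_' :: pvSquash (b :: t'))
                = List.dropWhile (fun c => c == '_') (pvSquash (b :: t')) by
                simp]
          rw [ih (t'.length + 1) (by simp at hn; omega) _ rfl]
          rw [show List.dropWhile (fun c => c == '_') ('_' :: b :: t')
                = List.dropWhile (fun c => c == '_') (b :: t') by simp [List.dropWhile_cons, beq_iff_eq]]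
        · rw [show List.dropWhile (fun c => c == '_') (a :: pvSquash (b :: t'))
                = a :: pvSquash (b :: t') by simp [beq_iff_eq, ha]]
          rw [show List.dropWhile (fun c => c == '_') (a :: b :: t')
                = a :: b :: t' by simp [beq_iff_eq, ha]]
          simp [pvSquash, hab]

theorem pvSquash_snoc (w : List Char) (c : Char) :
    pvSquash (w ++ [c])
      = if w.getLast? = some '_' ∧ c = '_' then pvSquash w else pvSquash w ++ [c] := by
  generalize hn : w.length = n
  induction n using Nat.strong_induction_on generalizing w with
  | _ n ih =>
  cases w with
  | nil => simp [pvSquash]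
  | cons a t =>
    cases t with
    | nil =>
      by_cases h : a = '_' ∧ c = '_' <;> simp [pvSquash, h]
    | cons b t' =>
      have iht := ih (t'.length + 1) (by simp at hn; omega) (b :: t') rfl
      by_cases hab : a = '_' ∧ b = '_'
      · rw [show (a :: b :: t') ++ [c] = a :: b :: (t' ++ [c]) by simp]
        rw [show pvSquash (a :: b :: (t' ++ [c])) = pvSquash (b :: (t' ++ [c])) by
          simp [pvSquash, hab]]
        rw [show pvSquash (a :: b :: t') = pvSquash (b :: t') by simp [pvSquash, hab]]
        rw [show (b :: (t' ++ [c])) = (b :: t') ++ [c] by simp]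
        rw [iht, List.getLast?_cons_cons]
      · rw [show (a :: b :: t') ++ [c] = a :: ((b :: t') ++ [c]) by simp]
        have hhead : ∃ r, (b :: t') ++ [c] = b :: r := ⟨t' ++ [c], by simp⟩
        obtain ⟨r, hr⟩ := hhead
        rw [hr]
        rw [show pvSquash (a :: b :: r) = a :: pvSquash (b :: r) by simp [pvSquash, hab]]
        rw [← hr, iht]
        rw [show pvSquash (a :: b :: t') = a :: pvSquash (b :: t') by simp [pvSquash, hab]]
        rw [List.getLast?_cons_cons]
        by_cases hlast : (b :: t').getLast? = some '_' ∧ c = '_' <;> simp [hlast]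

theorem pvSquash_reverse (w : List Char) :
    pvSquash w.reverse = (pvSquash w).reverse := by
  induction w with
  | nil => rfl
  | cons a t ih =>
    rw [List.reverse_cons, pvSquash_snoc, List.getLast?_reverse, ih]
    cases t with
    | nil => simp [pvSquash]
    | cons b t' =>
      by_cases hab : a = '_' ∧ b = '_'
      · rw [show pvSquash (a :: b :: t') = pvSquash (b :: t') by simp [pvSquash, hab]]
        simp [hab.1, hab.2]
      · rw [show pvSquash (a :: b :: t') = a :: pvSquash (b :: t') by simp [pvSquash, hab]]
        have : ¬ ((b :: t').head? = some '_' ∧ a = '_') := by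
          simp only [List.head?_cons]
          rintro ⟨hb, ha⟩
          exact hab ⟨ha, by simpa using hb⟩
        simp
        exact fun hb ha => hab ⟨ha, hb⟩

theorem pvStrip_eq (s : List Char) :
    PySem.Chars.stripChars s ['_']
      = (List.dropWhile (fun c => c == '_')
          ((List.dropWhile (fun c => c == '_') s).reverse)).reverse := by
  have hp : (fun c => List.contains ['_'] c) = (fun c : Char => c == '_') := by
    funext c
    by_cases h : c = '_' <;> simp [h]
  simp only [PySem.Chars.stripChars, hp]

theorem pvSquash_strip (w : List Char) :
    PySem.Chars.stripChars (pvSquash w) ['_'] = pvSquash (PySem.Chars.stripChars w ['_']) := by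
  rw [pvStrip_eq, pvStrip_eq]
  rw [pvSquash_dropWhile, ← pvSquash_reverse, pvSquash_dropWhile, ← pvSquash_reverse]

theorem pvSlugify_eq (base : List Char) : pvSlugifyA base = pvSlugifyB base := by
  simp only [pvSlugifyA, pvSlugifyB]
  rw [PySem.List.foldl_append_singleton_eq_map]
  simp only [List.nil_append]
  rw [PySem.Chars.join_nil_singletons]
  rw [pvFused_eq]
  simp only [List.nil_append]
  rw [(pvDedup_eq_squash _).1]
  rw [pvSlugLoop_eq_squash, ← pvSquash_strip]

theorem pvSuffix_eq (base : List Char) (l : List (List Char)) :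
    pvSuffixA base l = pvSuffixB base l := by
  induction l with
  | nil => rfl
  | cons suf rest ih => simp [pvSuffixA, pvSuffixB, ih]

theorem pvSlugifyB_ne_nil (base : List Char) : pvSlugifyB base ≠ [] := by
  simp only [pvSlugifyB]
  by_cases h : PySem.Chars.stripChars
      ((PySem.Chars.lower base).foldl
        (fun (p : List Char × Bool) c =>
          if PySem.Chars.isalnum c then (p.1 ++ [c], false)
          else if p.2 = false then (p.1 ++ ['_'], true) else (p.1, true))
        ([], false)).1 ['_'] = []
  · simp [h]
  · simp [h]

-- ===== VERDICT (by name: the statement is the Claim_ definition above) =====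
theorem model_slug_py_spec : Claim_equal_model_slug_py := by
  intro model_id _
  simp only [Spec_model_slug_py, model_slug_py, model_slug_py_alt]
  rw [pvSuffix_eq, pvSlugify_eq]
  rw [if_neg (pvSlugifyB_ne_nil _)]
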